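-- pv_equiv track=rewrite | github.com/donolsthoorn-dev/ktm-converter | modules/metafields_manager_export.py | _build_handle_to_title
-- ===== SOURCE A (Python) =====
-- def _build_handle_to_title(product_rows: list[dict]) -> dict[str, str]:
--     by_h: dict[str, str] = {}
--     for p in product_rows:
--         h = (p.get("handle") or "").strip()
--         t = (p.get("title") or "").strip()
--         if not h:
--             continue
--         if len(t) > len(by_h.get(h, "")):
--             by_h[h] = t
--     return by_h
-- ===== SOURCE B (Python) =====
-- def _build_handle_to_title(product_rows):
--     # Group the stripped titles per stripped handle; rows missing either
--     # a handle or a title contribute nothing.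
--     titles: dict[str, list[str]] = {}
--     for p in product_rows:
--         h = (p.get("handle") or "").strip()
--         t = (p.get("title") or "").strip()
--         if h and t:
--             titles.setdefault(h, []).append(t)
--     # Reduce each group to its longest title (first one on ties).
--     return {h: max(ts, key=len) for h, ts in titles.items()}
-- ===== Notes on version B (the rewrite author's own statement) =====
-- stated objective: alternative
-- what changed: Replaces the single pass with a running strictly-longer-title update by a group-then-reduce decomposition: one pass groups the stripped titles of rows that have both a handle and a title, then a dict comprehension maps each handle to max(titles, key=len).
import Mathlib
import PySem

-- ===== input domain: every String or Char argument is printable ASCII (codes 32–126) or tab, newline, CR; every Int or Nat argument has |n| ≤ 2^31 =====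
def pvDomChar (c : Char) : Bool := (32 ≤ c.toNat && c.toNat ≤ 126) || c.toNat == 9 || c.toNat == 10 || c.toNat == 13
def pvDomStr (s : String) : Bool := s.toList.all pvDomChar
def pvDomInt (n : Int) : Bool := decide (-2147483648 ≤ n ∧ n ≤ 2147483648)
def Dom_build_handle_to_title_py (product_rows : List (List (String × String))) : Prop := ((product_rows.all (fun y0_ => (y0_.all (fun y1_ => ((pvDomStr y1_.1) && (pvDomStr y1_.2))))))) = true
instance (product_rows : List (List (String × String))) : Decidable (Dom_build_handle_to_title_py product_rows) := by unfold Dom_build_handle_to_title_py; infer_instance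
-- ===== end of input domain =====

-- B replaces A's single pass with a running strictly-longer-title update by a
-- group-then-reduce decomposition: group the titles per handle, then map each
-- handle to its longest title; objective: alternative (same cost).

-- shared row accessors: both Pythons evaluate '(p.get(k) or "").strip()' literally
-- (rows are dicts ported as assoc lists, lookup = first match)
def pvRowGet (p : List (String × String)) (k : String) : Option String :=
  (p.find? (fun kv => kv.1 == k)).map (fun kv => kv.2)

def pvH (p : List (String × String)) : String :=
  PySem.Str.strip ((pvRowGet p "handle").getD "")

def pvT (p : List (String × String)) : String :=
  PySem.Str.strip ((pvRowGet p "title").getD "")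

-- ===== PORT A =====
def build_handle_to_title_py (product_rows : List (List (String × String))) : List (String × String) :=
  (product_rows.foldl
    (fun by_h p =>
      let h := pvH p
      let t := pvT p
      if h = "" then by_h
      else if PySem.Str.len t > PySem.Str.len (by_h.getD h "") then by_h.insert h t
      else by_h)
    PySem.Dict.empty).items

-- ===== PORT B =====
def build_handle_to_title_py_alt (product_rows : List (List (String × String))) : List (String × String) :=
  let titles : PySem.Dict String (List String) :=
    product_rows.foldl
      (fun d p =>
        let h := pvH p
        let t := pvT p
        if h ≠ "" ∧ t ≠ "" then d.modify h [] (fun ts => ts ++ [t]) else d)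
      PySem.Dict.empty
  -- {h: max(ts, key=len) for h, ts in titles.items()}; every group is nonempty,
  -- so the .getD "" default of the total max? is never used
  titles.items.map (fun kv => (kv.1, (PySem.List.max? kv.2 PySem.Str.len).getD ""))

-- ===== PRECONDITION & SPEC =====
def Spec_build_handle_to_title_py (product_rows : List (List (String × String))) (out : List (String × String)) : Prop := out = build_handle_to_title_py_alt product_rows
instance (product_rows : List (List (String × String))) (out : List (String × String)) : Decidable (Spec_build_handle_to_title_py product_rows out) := by unfold Spec_build_handle_to_title_py; infer_instance

-- ===== CLAIM (what is proved, stated in full; the proofs are below) =====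
def Claim_equal_build_handle_to_title_py : Prop := ∀ (product_rows : List (List (String × String))), Dom_build_handle_to_title_py product_rows → Spec_build_handle_to_title_py product_rows (build_handle_to_title_py product_rows)

-- ===== LEMMAS AND PROOFS =====

-- proof-only abbreviations of the two loop bodies, over normalized (handle, title) pairs
def pvStepA (d : PySem.Dict String String) (x : String × String) : PySem.Dict String String :=
  if x.1 = "" then d
  else if PySem.Str.len x.2 > PySem.Str.len (d.getD x.1 "") then d.insert x.1 x.2
  else d

def pvStepG (d : PySem.Dict String (List String)) (x : String × String) : PySem.Dict String (List String) :=
  if x.1 ≠ "" ∧ x.2 ≠ "" then d.modify x.1 [] (fun ts => ts ++ [x.2]) else d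

def pvTitles (l : List (String × String)) (h : String) : List String :=
  (l.filter (fun x => x.1 == h && x.2 != "")).map (fun x => x.2)

def pvRun (v : String) (ts : List String) : String :=
  ts.foldl (fun v t => if PySem.Str.len t > PySem.Str.len v then t else v) v

theorem pv_empty_of_len_zero (s : String) (h : s.toList.length = 0) : s = "" := by
  cases s; simp_all

theorem pv_len_pos (s : String) (h : s ≠ "") : 0 < PySem.Str.len s := by
  rw [PySem.Str.len_eq]
  have : s.toList.length ≠ 0 := fun hz => h (pv_empty_of_len_zero s hz)
  omega

theorem pv_len_nonneg (s : String) : 0 ≤ PySem.Str.len s := by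
  rw [PySem.Str.len_eq]; exact Int.natCast_nonneg _

theorem pv_len_empty : PySem.Str.len "" = 0 := by rw [PySem.Str.len_eq]; rfl

theorem pvTitles_cons_skip (x : String × String) (l : List (String × String)) (h : String)
    (hx : x.1 ≠ h ∨ x.2 = "") : pvTitles (x :: l) h = pvTitles l h := by
  rcases hx with hx | hx <;> simp [pvTitles, hx]

theorem pvTitles_cons_hit (x : String × String) (l : List (String × String)) (h : String)
    (hx : x.1 = h) (ht : x.2 ≠ "") : pvTitles (x :: l) h = x.2 :: pvTitles l h := by
  simp [pvTitles, hx, ht]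

theorem pvRun_cons (v t : String) (ts : List String) :
    pvRun v (t :: ts) = pvRun (if PySem.Str.len t > PySem.Str.len v then t else v) ts := rfl

theorem pvStepA_skip (d : PySem.Dict String String) (x : String × String) (hx : x.1 = "") :
    pvStepA d x = d := by simp [pvStepA, hx]

theorem pvStepA_skip_t (d : PySem.Dict String String) (x : String × String) (ht : x.2 = "") :
    pvStepA d x = d := by
  unfold pvStepA
  split_ifs with h1 h2
  · rfl
  · exfalso
    rw [ht, pv_len_empty] at h2
    have := pv_len_nonneg (d.getD x.1 "")
    omega
  · rfl

theorem pvStepG_skip (d : PySem.Dict String (List String)) (x : String × String)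
    (hx : x.1 = "" ∨ x.2 = "") : pvStepG d x = d := by
  unfold pvStepG
  rw [if_neg]
  rcases hx with hx | hx <;> intro hc
  · exact hc.1 hx
  · exact hc.2 hx

-- pass 1 of B groups exactly the non-empty titles of each non-empty handle
theorem titles_getD (l : List (String × String)) :
    ∀ (d : PySem.Dict String (List String)) (h : String), h ≠ "" →
      (l.foldl pvStepG d).getD h [] = d.getD h [] ++ pvTitles l h := by
  induction l with
  | nil => intro d h _; simp [pvTitles]
  | cons x l ih =>
    intro d h hne
    rw [List.foldl_cons]
    by_cases hx : x.1 = "" ∨ x.2 = ""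
    · rw [pvStepG_skip d x hx, ih d h hne, pvTitles_cons_skip x l h]
      rcases hx with hx | hx
      · exact Or.inl (by rw [hx]; exact Ne.symm hne)
      · exact Or.inr hx
    · rw [not_or] at hx
      have hG : pvStepG d x = d.modify x.1 [] (fun ts => ts ++ [x.2]) := by
        simp [pvStepG, hx.1, hx.2]
      by_cases hxh : x.1 = h
      · subst hxh
        rw [hG, ih _ _ hne, PySem.Dict.getD_modify_self,
          pvTitles_cons_hit x l x.1 rfl hx.2]
        simp
      · rw [hG, ih _ _ hne, PySem.Dict.getD_modify_of_ne _ _ _ (Ne.symm hxh),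
          pvTitles_cons_skip x l h (Or.inl hxh)]

-- A's final value at a key is the running strictly-longer fold over that key's titles
theorem A_getD (l : List (String × String)) :
    ∀ (d : PySem.Dict String String) (h : String), h ≠ "" →
      (l.foldl pvStepA d).getD h "" = pvRun (d.getD h "") (pvTitles l h) := by
  induction l with
  | nil => intro d h _; simp [pvTitles, pvRun]
  | cons x l ih =>
    intro d h hne
    rw [List.foldl_cons]
    by_cases hx : x.1 = ""
    · rw [pvStepA_skip d x hx, ih d h hne,
        pvTitles_cons_skip x l h (Or.inl (by rw [hx]; exact Ne.symm hne))]
    · by_cases ht : x.2 = ""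
      · rw [pvStepA_skip_t d x ht, ih d h hne, pvTitles_cons_skip x l h (Or.inr ht)]
      · by_cases hxh : x.1 = h
        · subst hxh
          rw [pvTitles_cons_hit x l x.1 rfl ht, pvRun_cons]
          by_cases hlt : PySem.Str.len x.2 > PySem.Str.len (d.getD x.1 "")
          · rw [show pvStepA d x = d.insert x.1 x.2 by
                simp only [pvStepA]; rw [if_neg hx, if_pos hlt],
              ih _ _ hne, PySem.Dict.getD_insert_self, if_pos hlt]
          · rw [show pvStepA d x = d by
                simp only [pvStepA]; rw [if_neg hx, if_neg hlt], ih _ _ hne, if_neg hlt]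
        · rw [pvTitles_cons_skip x l h (Or.inl hxh)]
          by_cases hlt : PySem.Str.len x.2 > PySem.Str.len (d.getD x.1 "")
          · rw [show pvStepA d x = d.insert x.1 x.2 by
                simp only [pvStepA]; rw [if_neg hx, if_pos hlt],
              ih _ _ hne, PySem.Dict.getD_insert_of_ne _ _ _ (Ne.symm hxh)]
          · rw [show pvStepA d x = d by
                simp only [pvStepA]; rw [if_neg hx, if_neg hlt], ih _ _ hne]

-- every key of A's final dict is a non-empty handle
theorem A_mem (l : List (String × String)) :
    ∀ (d : PySem.Dict String String) (h : String),
      h ∈ (l.foldl pvStepA d).keys → h ∈ d.keys ∨ h ≠ "" := by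
  induction l with
  | nil => intro d h hm; exact Or.inl hm
  | cons x l ih =>
    intro d h hm
    rw [List.foldl_cons] at hm
    rcases ih _ h hm with hm' | hne
    · by_cases hx : x.1 = ""
      · rw [pvStepA_skip d x hx] at hm'
        exact Or.inl hm'
      · by_cases hlt : PySem.Str.len x.2 > PySem.Str.len (d.getD x.1 "")
        · rw [show pvStepA d x = d.insert x.1 x.2 by
              simp only [pvStepA]; rw [if_neg hx, if_pos hlt]] at hm'
          rcases (PySem.Dict.mem_keys_insert d x.1 h x.2).mp hm' with heq | hmem
          · exact Or.inr (by rw [heq]; exact hx)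
          · exact Or.inl hmem
        · rw [show pvStepA d x = d by
              simp only [pvStepA]; rw [if_neg hx, if_neg hlt]] at hm'
          exact Or.inl hm'
    · exact Or.inr hne

-- both passes append a fresh key at exactly the same rows, so key order agrees
theorem keys_eq (l : List (String × String)) :
    ∀ (d : PySem.Dict String String) (g : PySem.Dict String (List String)),
      d.keys = g.keys →
      (l.foldl pvStepA d).keys = (l.foldl pvStepG g).keys := by
  induction l with
  | nil => intro d g hk; exact hk
  | cons x l ih =>
    intro d g hk
    rw [List.foldl_cons, List.foldl_cons]
    refine ih _ _ ?_
    by_cases hx : x.1 = ""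
    · rw [pvStepA_skip d x hx, pvStepG_skip g x (Or.inl hx)]; exact hk
    · by_cases ht : x.2 = ""
      · rw [pvStepA_skip_t d x ht, pvStepG_skip g x (Or.inr ht)]; exact hk
      · have hG : pvStepG g x = g.modify x.1 [] (fun ts => ts ++ [x.2]) := by
          simp [pvStepG, hx, ht]
        by_cases hmem : x.1 ∈ d.keys
        · have hcd : d.contains x.1 = true := (PySem.Dict.contains_iff_mem_keys d x.1).mpr hmem
          have hcg : g.contains x.1 = true :=
            (PySem.Dict.contains_iff_mem_keys g x.1).mpr (hk ▸ hmem)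
          have hGk : (pvStepG g x).keys = g.keys := by
            rw [hG, PySem.Dict.keys_modify, PySem.Dict.keys_insert_of_contains g _ hcg]
          by_cases hlt : PySem.Str.len x.2 > PySem.Str.len (d.getD x.1 "")
          · rw [show pvStepA d x = d.insert x.1 x.2 by
                simp only [pvStepA]; rw [if_neg hx, if_pos hlt],
              PySem.Dict.keys_insert_of_contains d x.2 hcd, hGk]
            exact hk
          · rw [show pvStepA d x = d by
                simp only [pvStepA]; rw [if_neg hx, if_neg hlt], hGk]
            exact hk
        · have hcd : d.contains x.1 = false := by
            cases h : d.contains x.1 with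
            | false => rfl
            | true => exact absurd ((PySem.Dict.contains_iff_mem_keys d x.1).mp h) hmem
          have hcg : g.contains x.1 = false := by
            cases h : g.contains x.1 with
            | false => rfl
            | true => exact absurd ((PySem.Dict.contains_iff_mem_keys g x.1).mp h) (hk ▸ hmem)
          have hlt : PySem.Str.len x.2 > PySem.Str.len (d.getD x.1 "") := by
            rw [PySem.Dict.getD_of_not_contains d "" hcd, pv_len_empty]
            exact pv_len_pos x.2 ht
          rw [show pvStepA d x = d.insert x.1 x.2 by
              simp only [pvStepA]; rw [if_neg hx, if_pos hlt],
            PySem.Dict.keys_insert_of_not_contains d x.2 hcd,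
            hG, PySem.Dict.keys_modify,
            PySem.Dict.keys_insert_of_not_contains g _ hcg, hk]

theorem A_nodup (l : List (String × String)) :
    ∀ (d : PySem.Dict String String), d.keys.Nodup → (l.foldl pvStepA d).keys.Nodup := by
  induction l with
  | nil => intro d hd; exact hd
  | cons x l ih =>
    intro d hd
    rw [List.foldl_cons]
    refine ih _ ?_
    unfold pvStepA
    split_ifs with h1 h2
    · exact hd
    · exact PySem.Dict.nodup_keys_insert d x.1 x.2 hd
    · exact hd

theorem G_nodup (l : List (String × String)) :
    ∀ (g : PySem.Dict String (List String)), g.keys.Nodup →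
      (l.foldl pvStepG g).keys.Nodup := by
  induction l with
  | nil => intro g hg; exact hg
  | cons x l ih =>
    intro g hg
    rw [List.foldl_cons]
    refine ih _ ?_
    unfold pvStepG
    split_ifs with h1
    · rw [PySem.Dict.keys_modify]
      exact PySem.Dict.nodup_keys_insert g x.1 _ hg
    · exact hg

-- Python's max(ts, key=len) (first maximum) computed step by step
theorem maxFold_some (ts : List String) :
    ∀ (v : String), PySem.List.max? (v :: ts) PySem.Str.len = some (pvRun v ts) := by
  induction ts with
  | nil => intro v; rfl
  | cons t ts ih =>
    intro v
    have h2 := ih (if PySem.Str.len t > PySem.Str.len v then t else v)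
    rw [pvRun_cons, ← h2]
    unfold PySem.List.max?
    rw [List.foldl_cons, List.foldl_cons, List.foldl_cons]
    congr 1
    show (if PySem.Str.len v < PySem.Str.len t then some t else some v)
        = some (if PySem.Str.len t > PySem.Str.len v then t else v)
    by_cases hlt : PySem.Str.len v < PySem.Str.len t
    · rw [if_pos hlt, if_pos hlt]
    · rw [if_neg hlt, if_neg hlt]

-- Python's max(ts, key=len) (first maximum) is A's running strictly-longer fold from ""
theorem run_eq_max (ts : List String) :
    pvRun "" ts = (PySem.List.max? ts PySem.Str.len).getD "" := by
  cases ts with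
  | nil => rfl
  | cons x ts =>
    rw [maxFold_some ts x, Option.getD_some, pvRun_cons]
    by_cases hx : x = ""
    · subst hx; rw [if_neg (by simp)]
    · rw [if_pos (by rw [pv_len_empty]; exact pv_len_pos x hx)]

-- A's port is the pvStepA fold over the normalized pairs
theorem portA_eq (rows : List (List (String × String))) :
    build_handle_to_title_py rows
      = ((rows.map (fun p => (pvH p, pvT p))).foldl pvStepA PySem.Dict.empty).items := by
  unfold build_handle_to_title_py
  rw [List.foldl_map]
  rfl

-- B's port is the pvStepG fold over the normalized pairs, reduced per key
theorem portB_eq (rows : List (List (String × String))) :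
    build_handle_to_title_py_alt rows
      = ((rows.map (fun p => (pvH p, pvT p))).foldl pvStepG PySem.Dict.empty).items.map
          (fun kv => (kv.1, (PySem.List.max? kv.2 PySem.Str.len).getD "")) := by
  unfold build_handle_to_title_py_alt
  rw [List.foldl_map]
  rfl

-- ===== VERDICT (by name: the statement is the Claim_ definition above) =====
theorem build_handle_to_title_py_spec : Claim_equal_build_handle_to_title_py := by
  intro rows _
  unfold Spec_build_handle_to_title_py
  rw [portA_eq, portB_eq]
  set l := rows.map (fun p => (pvH p, pvT p)) with hl
  have hna : (l.foldl pvStepA PySem.Dict.empty).keys.Nodup :=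
    A_nodup l _ (by rw [PySem.Dict.keys_empty]; exact List.nodup_nil)
  have hng : (l.foldl pvStepG PySem.Dict.empty).keys.Nodup :=
    G_nodup l _ (by rw [PySem.Dict.keys_empty]; exact List.nodup_nil)
  rw [PySem.Dict.items_eq_map_keys _ hna "", PySem.Dict.items_eq_map_keys _ hng [],
    List.map_map]
  have hk : (l.foldl pvStepA PySem.Dict.empty).keys
      = (l.foldl pvStepG PySem.Dict.empty).keys :=
    keys_eq l _ _ (by rw [PySem.Dict.keys_empty, PySem.Dict.keys_empty])
  rw [← hk]
  refine List.map_congr_left ?_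
  intro k hkmem
  rcases A_mem l PySem.Dict.empty k hkmem with hm | hne
  · rw [PySem.Dict.keys_empty] at hm; simp at hm
  · simp only [Function.comp, Prod.mk.injEq, true_and]
    rw [A_getD l _ k hne, PySem.Dict.getD_empty, run_eq_max,
      titles_getD l _ k hne, PySem.Dict.getD_empty, List.nil_append]
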